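-- pv_equiv track=rewrite | github.com/wang-zifu/Resume-Miner | utils.py | get_linkedin
-- ===== SOURCE A (Python) =====
-- def sortLength(val):
--     return len(val)
--
-- def get_linkedin(resume_list, names):
--     linkedin = []
--     data = []
--     for i in range(len(names)):
--         word_list = resume_list[i].lower().split()
--         data = []
--         for word in word_list:
--             if word.find("linkedin.com/in/") >= 0:
--                 data.append(word)
--         if data == []:
--             linkedin.append("NA")
--         else:
--             data.sort(key=sortLength, reverse=True)
--             linkedin.append(data[0].lower())
--     return linkedin
-- ===== SOURCE B (Python) =====
-- def get_linkedin(resume_list, names):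
--     linkedin = []
--     for i in range(len(names)):
--         best = None
--         for word in resume_list[i].lower().split():
--             if "linkedin.com/in/" in word and (best is None or len(best) < len(word)):
--                 best = word
--         linkedin.append("NA" if best is None else best)
--     return linkedin
-- ===== Notes on version B (the rewrite author's own statement) =====
-- stated objective: simpler
-- what changed: Replaces building a per-resume match list and stable reverse-sorting it by length with a single pass that tracks the first strictly-longest matching word; no intermediate list, no sort, no redundant re-lowering.
import Mathlib
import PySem

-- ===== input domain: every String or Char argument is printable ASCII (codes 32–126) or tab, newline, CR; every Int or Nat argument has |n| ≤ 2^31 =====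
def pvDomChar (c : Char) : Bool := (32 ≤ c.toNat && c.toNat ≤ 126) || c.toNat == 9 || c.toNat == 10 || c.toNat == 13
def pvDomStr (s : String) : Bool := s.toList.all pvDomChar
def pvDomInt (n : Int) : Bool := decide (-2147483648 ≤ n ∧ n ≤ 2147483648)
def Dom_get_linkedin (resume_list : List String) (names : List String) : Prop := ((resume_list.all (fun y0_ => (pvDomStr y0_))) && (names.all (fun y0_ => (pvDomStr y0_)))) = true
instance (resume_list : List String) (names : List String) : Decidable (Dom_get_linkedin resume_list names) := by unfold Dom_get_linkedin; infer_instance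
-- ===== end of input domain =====

-- B replaces A's per-resume match list + stable reverse length-sort with a single scan keeping the
-- first strictly-longest matching word (objective: simpler; return values only — neither mutates).

-- ===== PORT A =====
def sortLength (val : String) : Int := PySem.Str.len val

def get_linkedin (resume_list : List String) (names : List String) : List String :=
  (PySem.List.pyRange 0 (names.length : Int) 1).foldl (fun linkedin i =>
    -- resume_list[i]: IndexError (i ≥ len(resume_list)) is excluded by Pre_get_linkedin
    let word_list := PySem.Str.split₀ (PySem.Str.lower (PySem.List.pyGetD resume_list i ""))
    let data := word_list.foldl (fun data word =>
      if PySem.Str.find word "linkedin.com/in/" ≥ 0 then data ++ [word] else data) []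
    if data = [] then linkedin ++ ["NA"]
    else linkedin ++ [PySem.Str.lower ((PySem.List.sorted data sortLength true).headD "")]) []

-- ===== PORT B =====
def pickBest (words : List String) : Option String :=
  words.foldl (fun best w =>
    if PySem.Str.isIn "linkedin.com/in/" w &&
       (match best with | none => true | some b => decide (PySem.Str.len b < PySem.Str.len w))
    then some w else best) none

def get_linkedin_alt (resume_list : List String) (names : List String) : List String :=
  (PySem.List.pyRange 0 (names.length : Int) 1).map (fun i =>
    -- resume_list[i]: IndexError (i ≥ len(resume_list)) is excluded by Pre_get_linkedin
    match pickBest (PySem.Str.split₀ (PySem.Str.lower (PySem.List.pyGetD resume_list i ""))) with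
    | none => "NA"
    | some b => b)

-- ===== PRECONDITION & SPEC =====
-- Pre_ excludes exactly the inputs where both A and B raise IndexError: names longer than resume_list.
def Pre_get_linkedin (resume_list : List String) (names : List String) : Prop :=
  names.length ≤ resume_list.length
instance (resume_list : List String) (names : List String) : Decidable (Pre_get_linkedin resume_list names) := by unfold Pre_get_linkedin; infer_instance

def pvWitness_get_linkedin : List String × List String :=
  (["see linkedin.com/in/ada here", "nothing"], ["Ada", "Bob"])

def Spec_get_linkedin (resume_list : List String) (names : List String) (out : List String) : Prop := out = get_linkedin_alt resume_list names
instance (resume_list : List String) (names : List String) (out : List String) : Decidable (Spec_get_linkedin resume_list names out) := by unfold Spec_get_linkedin; infer_instance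

-- ===== CLAIM (what is proved, stated in full; the proofs are below) =====
def Claim_equal_get_linkedin : Prop := ∀ (resume_list : List String) (names : List String), Dom_get_linkedin resume_list names → Pre_get_linkedin resume_list names → Spec_get_linkedin resume_list names (get_linkedin resume_list names)

-- ===== LEMMAS AND PROOFS =====

-- first strictly-longest element of b :: ds (B's scan result on a nonempty match list)
def bestOf (b : String) (ds : List String) : String :=
  ds.foldl (fun b w => if PySem.Str.len b < PySem.Str.len w then w else b) b

-- per-resume value computed by A
def procA (resume : String) : String :=
  if ((PySem.Str.split₀ (PySem.Str.lower resume)).foldl (fun data word =>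
      if PySem.Str.find word "linkedin.com/in/" ≥ 0 then data ++ [word] else data) []) = []
  then "NA"
  else PySem.Str.lower ((PySem.List.sorted
    ((PySem.Str.split₀ (PySem.Str.lower resume)).foldl (fun data word =>
      if PySem.Str.find word "linkedin.com/in/" ≥ 0 then data ++ [word] else data) [])
    sortLength true).headD "")

-- per-resume value computed by B
def procB (resume : String) : String :=
  match pickBest (PySem.Str.split₀ (PySem.Str.lower resume)) with
  | none => "NA"
  | some b => b

theorem strLen_lt_iff (a b : String) :
    PySem.Str.len a < PySem.Str.len b ↔ a.length < b.length := by
  simp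

theorem bestOf_cons (b w : String) (ds : List String) :
    bestOf b (w :: ds) = bestOf (if PySem.Str.len b < PySem.Str.len w then w else b) ds := rfl

theorem bestOf_mem (ds : List String) : ∀ b, bestOf b ds ∈ b :: ds := by
  induction ds with
  | nil => intro b; simp [bestOf]
  | cons d ds ih =>
    intro b
    rw [bestOf_cons]
    rcases List.mem_cons.mp (ih (if PySem.Str.len b < PySem.Str.len d then d else b)) with h | h
    · rw [h]
      split_ifs
      · exact List.mem_cons_of_mem _ List.mem_cons_self
      · exact List.mem_cons_self
    · exact List.mem_cons_of_mem _ (List.mem_cons_of_mem _ h)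

theorem cond_eq (w : String) :
    (decide (PySem.Str.find w "linkedin.com/in/" ≥ 0)) = PySem.Str.isIn "linkedin.com/in/" w := by
  rcases h : PySem.Str.isIn "linkedin.com/in/" w with _ | _
  · apply decide_eq_false
    intro hge
    have hinf : ("linkedin.com/in/" : String).toList <:+: w.toList :=
      (PySem.Chars.find_nonneg_iff w.toList ("linkedin.com/in/" : String).toList).mp hge
    have htrue : PySem.Chars.isIn ("linkedin.com/in/" : String).toList w.toList = true :=
      (PySem.Chars.isIn_iff_infix _ _).mpr hinf
    have hfalse : PySem.Chars.isIn ("linkedin.com/in/" : String).toList w.toList = false := h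
    exact Bool.false_ne_true (hfalse ▸ htrue)
  · have htrue : PySem.Chars.isIn ("linkedin.com/in/" : String).toList w.toList = true := h
    exact decide_eq_true
      ((PySem.Chars.find_nonneg_iff w.toList ("linkedin.com/in/" : String).toList).mpr
        ((PySem.Chars.isIn_iff_infix _ _).mp htrue))

-- B's scan restricted to the matching words
theorem pickBest_filter : ∀ (ws : List String) (best : Option String),
    ws.foldl (fun best w =>
      if PySem.Str.isIn "linkedin.com/in/" w &&
         (match best with | none => true | some b => decide (PySem.Str.len b < PySem.Str.len w))
      then some w else best) best
    = (ws.filter (fun w => PySem.Str.isIn "linkedin.com/in/" w)).foldl (fun best w =>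
      if (match best with | none => true | some b => decide (PySem.Str.len b < PySem.Str.len w))
      then some w else best) best := by
  intro ws
  induction ws with
  | nil => intro best; rfl
  | cons w ws ih =>
    intro best
    rw [List.foldl_cons, List.filter_cons]
    rcases h : PySem.Str.isIn "linkedin.com/in/" w with _ | _
    · simp only [Bool.false_and, Bool.false_eq_true, if_false]
      exact ih best
    · simp only [Bool.true_and, if_true]
      rw [List.foldl_cons]
      exact ih _

theorem foldl_step2_some : ∀ (ds : List String) (b : String),
    ds.foldl (fun best w =>
      if (match best with | none => true | some b => decide (PySem.Str.len b < PySem.Str.len w))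
      then some w else best) (some b) = some (bestOf b ds) := by
  intro ds
  induction ds with
  | nil => intro b; simp [bestOf]
  | cons d ds ih =>
    intro b
    rw [List.foldl_cons, bestOf_cons]
    have h : (if (match (some b : Option String) with
          | none => true
          | some x => decide (PySem.Str.len x < PySem.Str.len d)) = true then some d else some b)
        = some (if PySem.Str.len b < PySem.Str.len d then d else b) := by
      show (if (decide (PySem.Str.len b < PySem.Str.len d)) = true then some d else some b) = _
      rcases hb : decide (PySem.Str.len b < PySem.Str.len d) with _ | _
      · rw [if_neg (by simp), if_neg (of_decide_eq_false hb)]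
      · rw [if_pos rfl, if_pos (of_decide_eq_true hb)]
    rw [h, ih]

-- head of the stable reverse insertion sort = first strictly-longest element
theorem insfold_head : ∀ (ds : List String) (h : String) (t : List String),
    (ds.foldl (fun acc x =>
      PySem.List.insertBy (fun a b => decide (sortLength b < sortLength a)) x acc) (h :: t)).headD ""
    = bestOf h ds := by
  intro ds
  induction ds with
  | nil => intro h t; simp [bestOf]
  | cons w ds ih =>
    intro h t
    rw [List.foldl_cons, bestOf_cons]
    by_cases hc : PySem.Str.len h < PySem.Str.len w
    · have hc' : h.length < w.length := (strLen_lt_iff h w).mp hc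
      have hi : PySem.List.insertBy (fun a b => decide (sortLength b < sortLength a)) w (h :: t)
          = w :: h :: t := by
        simp [PySem.List.insertBy, sortLength, hc']
      rw [hi, if_pos hc]
      exact ih w (h :: t)
    · have hc' : ¬ h.length < w.length := fun hx => hc ((strLen_lt_iff h w).mpr hx)
      have hi : PySem.List.insertBy (fun a b => decide (sortLength b < sortLength a)) w (h :: t)
          = h :: PySem.List.insertBy (fun a b => decide (sortLength b < sortLength a)) w t := by
        simp [PySem.List.insertBy, sortLength, hc']
      rw [hi, if_neg hc]
      exact ih h _

theorem sorted_head (d : String) (ds : List String) :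
    (PySem.List.sorted (d :: ds) sortLength true).headD "" = bestOf d ds := by
  rw [PySem.List.sorted_rev_eq_foldl_insertBy, List.foldl_cons]
  have h1 : PySem.List.insertBy (fun a b => decide (sortLength b < sortLength a)) d [] = [d] := by
    simp [PySem.List.insertBy]
  rw [h1]
  exact insfold_head ds d []

theorem char_le_iff (a b : Char) : a ≤ b ↔ a.toNat ≤ b.toNat := by
  rw [Char.le_def, UInt32.le_iff_toNat_le]
  exact Iff.rfl

theorem lowerChar_idem (c : Char) :
    PySem.Chars.lowerChar (PySem.Chars.lowerChar c) = PySem.Chars.lowerChar c := by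
  by_cases h : PySem.Chars.isupper c = true
  · have hb : 'A' ≤ c ∧ c ≤ 'Z' := by
      have h' := h
      unfold PySem.Chars.isupper at h'
      rw [Bool.and_eq_true, decide_eq_true_eq, decide_eq_true_eq] at h'
      exact h'
    have h90 : c.toNat ≤ 90 := by
      have := (char_le_iff c 'Z').mp hb.2
      have hz : ('Z' : Char).toNat = 90 := rfl
      omega
    have h65 : 65 ≤ c.toNat := by
      have := (char_le_iff 'A' c).mp hb.1
      have ha : ('A' : Char).toNat = 65 := rfl
      omega
    have hval : (c.toNat + 32).isValidChar := by
      left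
      omega
    have htn : (Char.ofNat (c.toNat + 32)).toNat = c.toNat + 32 := by
      rw [Char.toNat_ofNat, if_pos hval]
    have hne : PySem.Chars.isupper (Char.ofNat (c.toNat + 32)) = false := by
      have hle : ¬ (Char.ofNat (c.toNat + 32) ≤ 'Z') := by
        rw [char_le_iff, htn]
        have hz : ('Z' : Char).toNat = 90 := rfl
        omega
      simp [PySem.Chars.isupper, hle]
    unfold PySem.Chars.lowerChar
    rw [if_pos h]
    rw [if_neg (by rw [hne]; exact Bool.false_ne_true)]
  · unfold PySem.Chars.lowerChar
    rw [if_neg h, if_neg h]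

theorem split₀_go_chars (U : Char → Prop) :
    ∀ (s cur : List Char) (acc : List (List Char)),
      (∀ c ∈ s, U c) → (∀ c ∈ cur, U c) → (∀ w ∈ acc, ∀ c ∈ w, U c) →
      ∀ w ∈ PySem.Chars.split₀.go s cur acc, ∀ c ∈ w, U c := by
  intro s
  induction s with
  | nil =>
    intro cur acc _ hcur hacc w hw
    simp only [PySem.Chars.split₀.go] at hw
    split_ifs at hw with h
    · exact hacc w (List.mem_reverse.mp hw)
    · rcases List.mem_cons.mp (List.mem_reverse.mp hw) with h1 | h1
      · intro c hc; exact hcur c (List.mem_reverse.mp (h1 ▸ hc))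
      · exact hacc w h1
  | cons ch rest ih =>
    intro cur acc hs hcur hacc w hw
    simp only [PySem.Chars.split₀.go] at hw
    split_ifs at hw with h1 h2
    · exact ih [] acc (fun c hc => hs c (List.mem_cons_of_mem _ hc)) (by simp) hacc w hw
    · refine ih [] (cur.reverse :: acc) (fun c hc => hs c (List.mem_cons_of_mem _ hc)) (by simp)
        ?_ w hw
      intro v hv c hc
      rcases List.mem_cons.mp hv with h3 | h3
      · exact hcur c (List.mem_reverse.mp (h3 ▸ hc))
      · exact hacc v h3 c hc
    · refine ih (ch :: cur) acc (fun c hc => hs c (List.mem_cons_of_mem _ hc)) ?_ hacc w hw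
      intro c hc
      rcases List.mem_cons.mp hc with h3 | h3
      · exact h3 ▸ hs ch List.mem_cons_self
      · exact hcur c h3

theorem lower_fixed_of_mem_split (r w : String)
    (hw : w ∈ PySem.Str.split₀ (PySem.Str.lower r)) : PySem.Str.lower w = w := by
  rw [← String.toList_inj, PySem.Str.toList_lower]
  have hmem : w.toList ∈ PySem.Chars.split₀ (PySem.Str.lower r).toList := by
    rw [← PySem.Str.split₀_map_toList]
    exact List.mem_map_of_mem hw
  have hchars : ∀ c ∈ w.toList, PySem.Chars.lowerChar c = c := by
    refine split₀_go_chars (fun c => PySem.Chars.lowerChar c = c)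
      (PySem.Str.lower r).toList [] [] ?_ (by simp) (by simp) w.toList hmem
    intro c hc
    rw [PySem.Str.toList_lower] at hc
    rcases List.mem_map.mp hc with ⟨c0, _, rfl⟩
    exact lowerChar_idem c0
  calc PySem.Chars.lower w.toList = w.toList.map id := List.map_congr_left hchars
    _ = w.toList := List.map_id _

theorem proc_eq (r : String) : procA r = procB r := by
  unfold procA procB pickBest
  rw [PySem.List.foldl_append_ite_eq_filter
    (fun word => PySem.Str.find word "linkedin.com/in/" ≥ 0)]
  rw [pickBest_filter]
  have hfe : (PySem.Str.split₀ (PySem.Str.lower r)).filter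
        (fun x => decide (PySem.Str.find x "linkedin.com/in/" ≥ 0))
      = (PySem.Str.split₀ (PySem.Str.lower r)).filter
        (fun w => PySem.Str.isIn "linkedin.com/in/" w) := by
    apply List.filter_congr
    intro x _
    exact cond_eq x
  rw [List.nil_append, hfe]
  rcases hd : (PySem.Str.split₀ (PySem.Str.lower r)).filter
      (fun w => PySem.Str.isIn "linkedin.com/in/" w) with _ | ⟨d, ds⟩
  · rfl
  · have hbest : (d :: ds).foldl (fun best w =>
        if (match best with | none => true | some b => decide (PySem.Str.len b < PySem.Str.len w))
        then some w else best) none = some (bestOf d ds) := by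
      rw [List.foldl_cons]
      have hstep : (if (match (none : Option String) with
          | none => true
          | some b => decide (PySem.Str.len b < PySem.Str.len d)) = true then some d else none)
          = some d := rfl
      rw [hstep]
      exact foldl_step2_some ds d
    rw [hbest, if_neg (List.cons_ne_nil d ds), sorted_head]
    have hmem : bestOf d ds ∈ PySem.Str.split₀ (PySem.Str.lower r) := by
      have h1 : bestOf d ds ∈ d :: ds := bestOf_mem ds d
      have h2 : bestOf d ds ∈ (PySem.Str.split₀ (PySem.Str.lower r)).filter
          (fun w => PySem.Str.isIn "linkedin.com/in/" w) := hd ▸ h1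
      exact List.mem_of_mem_filter h2
    exact lower_fixed_of_mem_split r _ hmem

theorem getA_eq (rl ns : List String) :
    get_linkedin rl ns
    = (PySem.List.pyRange 0 (ns.length : Int) 1).map
        (fun i => procA (PySem.List.pyGetD rl i "")) := by
  unfold get_linkedin
  have h : (fun (linkedin : List String) (i : Int) =>
      let word_list := PySem.Str.split₀ (PySem.Str.lower (PySem.List.pyGetD rl i ""))
      let data := word_list.foldl (fun data word =>
        if PySem.Str.find word "linkedin.com/in/" ≥ 0 then data ++ [word] else data) []
      if data = [] then linkedin ++ ["NA"]
      else linkedin ++ [PySem.Str.lower ((PySem.List.sorted data sortLength true).headD "")])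
      = (fun acc i => acc ++ [procA (PySem.List.pyGetD rl i "")]) := by
    funext acc i
    show (if _ = ([] : List String) then acc ++ ["NA"] else acc ++ [_]) = acc ++ [procA _]
    unfold procA
    split <;> rfl
  rw [h, PySem.List.foldl_append_singleton_eq_map, List.nil_append]

-- ===== VERDICT (by name: the statement is the Claim_ definition above) =====
theorem get_linkedin_spec : Claim_equal_get_linkedin := by
  intro rl ns _ _
  unfold Spec_get_linkedin get_linkedin_alt
  rw [getA_eq]
  apply List.map_congr_left
  intro i _
  exact proc_eq _
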